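-- pv_equiv track=rewrite | github.com/Ander456/py_program | day16.py | dfs
-- ===== SOURCE A (Python) =====
-- def dfs(n, s, nb):
--     if n[s] == 0:
--         return True
--     for i in [-1, 1]:
--         # 这时我们又两个选择
--         next = s + i * n[s]
--         if next < len(n) and next >= 0 and (next not in nb):
--             nb.add(next)
--             # 给notebook添加了之后我们要继续往深走 自然而然就是递归
--             if dfs(n, next, nb):
--                 # 表示说如果我这次选择可以走到目标位置
--                 # nb.remove(next)
--                 return True
--             nb.remove(next) # 这里为什么要删掉从notebook里就是我们上次选择不对那么那些我们标记的要被取消调因为我这次选择很可能再去找这些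
--     return False # 如果都没找到表示不行
-- ===== SOURCE B (Python) =====
-- def dfs(n, s, nb):
--     # Iterative DFS with a permanent visited set (no backtracking).
--     # Return value only: does NOT mutate nb (A leaves path nodes in nb on success).
--     if n[s] == 0:
--         return True
--     seen = {s}
--     stack = [s]
--     while stack:
--         v = stack.pop()
--         x = n[v]
--         if x == 0:
--             return True
--         for w in (v - x, v + x):
--             if 0 <= w < len(n) and w not in nb and w not in seen:
--                 seen.add(w)
--                 stack.append(w)
--     return False
-- ===== Notes on version B (the rewrite author's own statement) =====
-- stated objective: alternative
-- what changed: Replaced the backtracking recursion (which un-marks visited cells after each failed branch and can revisit them) by an iterative DFS over an explicit stack with a permanent visited set, visiting each cell at most once; B also does not mutate nb.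
import Mathlib
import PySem

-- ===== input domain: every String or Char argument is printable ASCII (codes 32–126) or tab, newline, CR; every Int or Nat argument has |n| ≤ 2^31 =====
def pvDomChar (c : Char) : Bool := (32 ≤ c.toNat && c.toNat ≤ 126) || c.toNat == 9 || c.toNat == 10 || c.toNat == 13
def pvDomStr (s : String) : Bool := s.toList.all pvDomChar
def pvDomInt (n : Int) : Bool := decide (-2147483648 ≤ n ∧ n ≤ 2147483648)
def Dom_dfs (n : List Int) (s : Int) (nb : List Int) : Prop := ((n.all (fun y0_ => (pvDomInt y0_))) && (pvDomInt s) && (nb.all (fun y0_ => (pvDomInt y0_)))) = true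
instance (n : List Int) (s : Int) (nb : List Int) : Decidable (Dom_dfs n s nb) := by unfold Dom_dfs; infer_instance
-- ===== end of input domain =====

-- B replaces A's backtracking recursion by an iterative DFS over an explicit stack with a
-- permanent visited set (return value only: A mutates the set nb, B does not).

-- helper used by both ports' termination measures: how many in-range cells are not yet marked
def pvFresh (n : List Int) (nb : List Int) : Nat :=
  ((List.range n.length).filter (fun (i : Nat) => decide (¬ ((i : Int) ∈ nb)))).length

theorem pvCountP_lt {α : Type} (p q : α → Bool) (hpq : ∀ a, q a = true → p a = true) :
    ∀ (l : List α) (a : α), a ∈ l → p a = true → q a = false → l.countP q < l.countP p := by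
  intro l
  induction l with
  | nil => intro a ha; cases ha
  | cons b t ih =>
    intro a ha hp hq
    have hb : (if q b = true then 1 else 0) ≤ (if p b = true then 1 else 0) := by
      by_cases h : q b = true
      · simp [h, hpq b h]
      · simp [h]
    rcases List.mem_cons.mp ha with rfl | hmem
    · have hle : t.countP q ≤ t.countP p := List.countP_mono_left (fun a _ h => hpq a h)
      rw [List.countP_cons, List.countP_cons, hp, hq]
      simp only [if_true]
      simp only [show (false = true) = False by simp, if_false]
      omega
    · have := ih a hmem hp hq
      rw [List.countP_cons, List.countP_cons]
      omega

theorem pvFresh_lt (n : List Int) (nb : List Int) (w : Int) (hge : 0 ≤ w)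
    (hlt : w < (n.length : Int)) (hnb : w ∉ nb) : pvFresh n (w :: nb) < pvFresh n nb := by
  unfold pvFresh
  rw [← List.countP_eq_length_filter, ← List.countP_eq_length_filter]
  refine pvCountP_lt _ _ ?_ _ w.toNat ?_ ?_ ?_
  · intro a ha
    simp only [decide_eq_true_eq] at *
    intro hmem; exact ha (List.mem_cons_of_mem _ hmem)
  · exact List.mem_range.mpr (by omega)
  · simp only [decide_eq_true_eq]
    rwa [Int.toNat_of_nonneg hge]
  · simp only [decide_eq_false_iff_not, not_not]
    rw [Int.toNat_of_nonneg hge]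
    exact List.mem_cons_self ..

-- ===== PORT A =====
def dfs (n : List Int) (s : Int) (nb : List Int) : Bool :=
  match PySem.List.pyGet? n s with
  | none => false                       -- Python raises IndexError here; outside Pre_dfs
  | some x =>
    if x = 0 then true
    else
      -- for i in [-1, 1]: next = s + i*n[s]; backtracking recursion
      (if h1 : s + (-1) * x < (n.length : Int) ∧ 0 ≤ s + (-1) * x ∧ s + (-1) * x ∉ nb then
        dfs n (s + (-1) * x) ((s + (-1) * x) :: nb)
      else false) ||
      (if h2 : s + 1 * x < (n.length : Int) ∧ 0 ≤ s + 1 * x ∧ s + 1 * x ∉ nb then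
        dfs n (s + 1 * x) ((s + 1 * x) :: nb)
      else false)
termination_by pvFresh n nb
decreasing_by
  · exact pvFresh_lt n nb _ h1.2.1 h1.1 h1.2.2
  · exact pvFresh_lt n nb _ h2.2.1 h2.1 h2.2.2

-- ===== PORT B =====
-- the while loop of Source B: pop v, try the two jumps, mark fresh ones permanently
def dfsLoop (n : List Int) (nb : List Int) (stack : List Int) (seen : List Int) : Bool :=
  match stack with
  | [] => false
  | v :: rest =>
    match PySem.List.pyGet? n v with
    | none => false                     -- unreachable from dfs_alt: every stacked index is in range
    | some x =>
      if x = 0 then true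
      else
        if h1 : 0 ≤ v - x ∧ v - x < (n.length : Int) ∧ v - x ∉ nb ∧ v - x ∉ seen then
          if h2 : 0 ≤ v + x ∧ v + x < (n.length : Int) ∧ v + x ∉ nb ∧ v + x ∉ ((v - x) :: seen) then
            dfsLoop n nb ((v + x) :: (v - x) :: rest) ((v + x) :: (v - x) :: seen)
          else dfsLoop n nb ((v - x) :: rest) ((v - x) :: seen)
        else
          if h2 : 0 ≤ v + x ∧ v + x < (n.length : Int) ∧ v + x ∉ nb ∧ v + x ∉ seen then
            dfsLoop n nb ((v + x) :: rest) ((v + x) :: seen)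
          else dfsLoop n nb rest seen
termination_by 3 * pvFresh n seen + stack.length
decreasing_by
  · have a1 : pvFresh n ((v - x) :: seen) < pvFresh n seen :=
      pvFresh_lt n seen _ h1.1 h1.2.1 h1.2.2.2
    have a2 : pvFresh n ((v + x) :: (v - x) :: seen) < pvFresh n ((v - x) :: seen) :=
      pvFresh_lt n ((v - x) :: seen) _ h2.1 h2.2.1 h2.2.2.2
    simp only [List.length_cons]; omega
  · have a1 : pvFresh n ((v - x) :: seen) < pvFresh n seen :=
      pvFresh_lt n seen _ h1.1 h1.2.1 h1.2.2.2
    simp only [List.length_cons]; omega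
  · have a1 : pvFresh n ((v + x) :: seen) < pvFresh n seen :=
      pvFresh_lt n seen _ h2.1 h2.2.1 h2.2.2.2
    simp only [List.length_cons]; omega
  · simp only [List.length_cons]; omega

def dfs_alt (n : List Int) (s : Int) (nb : List Int) : Bool :=
  match PySem.List.pyGet? n s with
  | none => false                       -- Source B raises IndexError here too; outside Pre_dfs
  | some x =>
    if x = 0 then true
    else dfsLoop n nb [s] [s]

-- ===== PRECONDITION & SPEC =====
-- Pre_dfs is exactly the non-raising domain: A evaluates n[s], which raises IndexError
-- unless -len(n) <= s < len(n) (all recursive calls are then in range by construction).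
def Pre_dfs (n : List Int) (s : Int) (nb : List Int) : Prop :=
  -(n.length : Int) ≤ s ∧ s < (n.length : Int)
instance (n : List Int) (s : Int) (nb : List Int) : Decidable (Pre_dfs n s nb) := by
  unfold Pre_dfs; infer_instance

def pvWitness_dfs : List Int × Int × List Int := ([1, 0], 0, [])

def Spec_dfs (n : List Int) (s : Int) (nb : List Int) (out : Bool) : Prop := out = dfs_alt n s nb
instance (n : List Int) (s : Int) (nb : List Int) (out : Bool) : Decidable (Spec_dfs n s nb out) := by
  unfold Spec_dfs; infer_instance

-- ===== CLAIM (what is proved, stated in full; the proofs are below) =====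
def Claim_equal_dfs : Prop := ∀ (n : List Int) (s : Int) (nb : List Int), Dom_dfs n s nb → Pre_dfs n s nb → Spec_dfs n s nb (dfs n s nb)

-- ===== LEMMAS AND PROOFS =====

-- reachability of a zero cell, avoiding the (fixed) blocked set nb
inductive pvR (n : List Int) (nb : List Int) : Int → Prop where
  | zero (v x : Int) (hx : PySem.List.pyGet? n v = some x) (h0 : x = 0) : pvR n nb v
  | step (v w x : Int) (hx : PySem.List.pyGet? n v = some x) (h0 : x ≠ 0)
      (hw : w = v - x ∨ w = v + x) (hge : 0 ≤ w) (hlt : w < (n.length : Int))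
      (hnb : w ∉ nb) (hr : pvR n nb w) : pvR n nb v

-- the same, mirroring A: the blocked set grows along the path
inductive pvRA (n : List Int) : List Int → Int → Prop where
  | zero (nb : List Int) (v x : Int) (hx : PySem.List.pyGet? n v = some x) (h0 : x = 0) : pvRA n nb v
  | step (nb : List Int) (v w x : Int) (hx : PySem.List.pyGet? n v = some x) (h0 : x ≠ 0)
      (hw : w = v - x ∨ w = v + x) (hge : 0 ≤ w) (hlt : w < (n.length : Int))
      (hnb : w ∉ nb) (hr : pvRA n (w :: nb) w) : pvRA n nb v

-- reachability with a depth bound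
inductive pvRD (n : List Int) (nb : List Int) : Nat → Int → Prop where
  | zero (d : Nat) (v x : Int) (hx : PySem.List.pyGet? n v = some x) (h0 : x = 0) : pvRD n nb d v
  | step (d : Nat) (v w x : Int) (hx : PySem.List.pyGet? n v = some x) (h0 : x ≠ 0)
      (hw : w = v - x ∨ w = v + x) (hge : 0 ≤ w) (hlt : w < (n.length : Int))
      (hnb : w ∉ nb) (hr : pvRD n nb d w) : pvRD n nb (d + 1) v

theorem pvR_iff_exists (n : List Int) (nb : List Int) (v : Int) :
    pvR n nb v ↔ ∃ d, pvRD n nb d v := by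
  constructor
  · intro h
    induction h with
    | zero v x hx h0 => exact ⟨0, .zero 0 v x hx h0⟩
    | step v w x hx h0 hw hge hlt hnb hr ih =>
      obtain ⟨d, hd⟩ := ih
      exact ⟨d + 1, .step d v w x hx h0 hw hge hlt hnb hd⟩
  · rintro ⟨d, h⟩
    induction h with
    | zero d v x hx h0 => exact .zero v x hx h0
    | step d v w x hx h0 hw hge hlt hnb hr ih => exact .step v w x hx h0 hw hge hlt hnb ih

theorem pvR_drop (n : List Int) :
    ∀ (nb' : List Int) (v : Int), pvR n nb' v → ∀ (y : Int) (nb : List Int), nb' = y :: nb → pvR n nb v := by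
  intro nb' v h
  induction h with
  | zero v x hx h0 => intro y nb _; exact .zero v x hx h0
  | step v w x hx h0 hw hge hlt hnbm hr ih =>
    intro y nb hEq
    subst hEq
    exact .step v w x hx h0 hw hge hlt (fun hm => hnbm (List.mem_cons_of_mem _ hm)) (ih y nb rfl)

theorem pvR_avoid (n : List Int) (nb : List Int) :
    ∀ v, pvR n nb v → ∀ y, pvR n (y :: nb) v ∨ pvR n (y :: nb) y := by
  intro v h
  induction h with
  | zero v x hx h0 => intro y; exact .inl (.zero v x hx h0)
  | step v w x hx h0 hw hge hlt hnb hr ih =>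
    intro y
    rcases ih y with hL | hR
    · by_cases hwy : w = y
      · subst hwy; exact .inr hL
      · exact .inl (.step v w x hx h0 hw hge hlt
          (by intro hm; rcases List.mem_cons.mp hm with h' | h'; exact hwy h'; exact hnb h') hL)
    · exact .inr hR

theorem pvRA_of_pvR (n : List Int) :
    ∀ (k : Nat) (nb : List Int) (v : Int), pvFresh n nb = k → pvR n nb v → pvRA n nb v := by
  intro k
  induction k using Nat.strong_induction_on with
  | _ k IH =>
    intro nb v hk hr
    cases hr with
    | zero v x hx h0 => exact .zero nb v x hx h0
    | step v w x hx h0 hw hge hlt hnb hrw =>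
      have h1 : pvR n (w :: nb) w := by
        rcases pvR_avoid n nb w hrw w with h | h <;> exact h
      have hlt' : pvFresh n (w :: nb) < k := hk ▸ pvFresh_lt n nb w hge hlt hnb
      exact .step nb v w x hx h0 hw hge hlt hnb (IH _ hlt' (w :: nb) w rfl h1)

theorem pvR_of_pvRA (n : List Int) :
    ∀ (nb : List Int) (v : Int), pvRA n nb v → pvR n nb v := by
  intro nb v h
  induction h with
  | zero nb v x hx h0 => exact .zero v x hx h0
  | step nb v w x hx h0 hw hge hlt hnb hr ih =>
    exact .step v w x hx h0 hw hge hlt hnb (pvR_drop n (w :: nb) w ih w nb rfl)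

-- A's port decides pvRA
theorem dfs_of_pvRA (n : List Int) :
    ∀ (nb : List Int) (s : Int), pvRA n nb s → dfs n s nb = true := by
  intro nb s h
  induction h with
  | zero nb v x hx h0 =>
    rw [dfs, hx]
    dsimp only
    rw [h0, if_pos rfl]
  | step nb v w x hx h0 hw hge hlt hnb hr ih =>
    rw [dfs, hx]
    dsimp only
    rw [if_neg h0]
    apply Bool.or_eq_true_iff.mpr
    rcases hw with hwe | hwe
    · left
      have he : v + (-1) * x = w := by rw [hwe]; ring
      rw [he, dif_pos ⟨hlt, hge, hnb⟩]
      exact ih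
    · right
      have he : v + 1 * x = w := by rw [hwe]; ring
      rw [he, dif_pos ⟨hlt, hge, hnb⟩]
      exact ih

theorem dfs_true_iff (n : List Int) :
    ∀ (k : Nat) (nb : List Int) (s : Int), pvFresh n nb = k →
      (dfs n s nb = true ↔ pvRA n nb s) := by
  intro k
  induction k using Nat.strong_induction_on with
  | _ k IH =>
    intro nb s hk
    constructor
    · intro h
      rw [dfs] at h
      cases hget : PySem.List.pyGet? n s with
      | none => rw [hget] at h; cases h
      | some x =>
        rw [hget] at h
        dsimp only at h
        by_cases hx0 : x = 0
        · exact .zero nb s x hget hx0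
        · rw [if_neg hx0] at h
          rcases Bool.or_eq_true_iff.mp h with h | h
          · by_cases h1 : s + (-1) * x < (n.length : Int) ∧ 0 ≤ s + (-1) * x ∧ s + (-1) * x ∉ nb
            · rw [dif_pos h1] at h
              have hlt' : pvFresh n ((s + (-1) * x) :: nb) < k :=
                hk ▸ pvFresh_lt n nb _ h1.2.1 h1.1 h1.2.2
              exact .step nb s (s + (-1) * x) x hget hx0 (.inl (by ring)) h1.2.1 h1.1 h1.2.2
                ((IH _ hlt' _ _ rfl).mp h)
            · rw [dif_neg h1] at h; cases h
          · by_cases h2 : s + 1 * x < (n.length : Int) ∧ 0 ≤ s + 1 * x ∧ s + 1 * x ∉ nb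
            · rw [dif_pos h2] at h
              have hlt' : pvFresh n ((s + 1 * x) :: nb) < k :=
                hk ▸ pvFresh_lt n nb _ h2.2.1 h2.1 h2.2.2
              exact .step nb s (s + 1 * x) x hget hx0 (.inr (by ring)) h2.2.1 h2.1 h2.2.2
                ((IH _ hlt' _ _ rfl).mp h)
            · rw [dif_neg h2] at h; cases h
    · exact dfs_of_pvRA n nb s

-- walks from the start s (used for soundness of B's loop)
inductive pvWalk (n : List Int) (nb : List Int) (s : Int) : Int → Prop where
  | refl : pvWalk n nb s s
  | snoc (v w x : Int) (hv : pvWalk n nb s v) (hx : PySem.List.pyGet? n v = some x)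
      (h0 : x ≠ 0) (hw : w = v - x ∨ w = v + x) (hge : 0 ≤ w)
      (hlt : w < (n.length : Int)) (hnb : w ∉ nb) : pvWalk n nb s w

theorem pvWalk_R (n : List Int) (nb : List Int) (s : Int) :
    ∀ v, pvWalk n nb s v → pvR n nb v → pvR n nb s := by
  intro v h
  induction h with
  | refl => exact id
  | snoc v w x hv hx h0 hw hge hlt hnb ih =>
    intro hr
    exact ih (.step v w x hx h0 hw hge hlt hnb hr)

theorem dfsLoop_sound (n : List Int) (nb : List Int) (s : Int) :
    ∀ (stack seen : List Int), (∀ u ∈ stack, pvWalk n nb s u) →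
      dfsLoop n nb stack seen = true → pvR n nb s := by
  intro stack seen
  induction stack, seen using dfsLoop.induct n nb with
  | case1 seen =>
    intro _ ht
    rw [dfsLoop] at ht
    cases ht
  | case2 seen v rest hget =>
    intro _ ht
    rw [dfsLoop, hget] at ht
    cases ht
  | case3 seen v rest hget =>
    intro hw _
    exact pvWalk_R n nb s v (hw v (List.mem_cons_self ..)) (.zero v 0 hget rfl)
  | case4 seen v rest x hget hx0 h1 h2 ih =>
    intro hw ht
    rw [dfsLoop, hget] at ht
    dsimp only at ht
    rw [if_neg hx0, dif_pos h1, dif_pos h2] at ht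
    refine ih ?_ ht
    intro u hu
    have hv := hw v (List.mem_cons_self ..)
    rcases List.mem_cons.mp hu with rfl | hu
    · exact .snoc v (v + x) x hv hget hx0 (.inr rfl) h2.1 h2.2.1 h2.2.2.1
    · rcases List.mem_cons.mp hu with rfl | hu
      · exact .snoc v (v - x) x hv hget hx0 (.inl rfl) h1.1 h1.2.1 h1.2.2.1
      · exact hw u (List.mem_cons_of_mem _ hu)
  | case5 seen v rest x hget hx0 h1 h2 ih =>
    intro hw ht
    rw [dfsLoop, hget] at ht
    dsimp only at ht
    rw [if_neg hx0, dif_pos h1, dif_neg h2] at ht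
    refine ih ?_ ht
    intro u hu
    have hv := hw v (List.mem_cons_self ..)
    rcases List.mem_cons.mp hu with rfl | hu
    · exact .snoc v (v - x) x hv hget hx0 (.inl rfl) h1.1 h1.2.1 h1.2.2.1
    · exact hw u (List.mem_cons_of_mem _ hu)
  | case6 seen v rest x hget hx0 h1 h2 ih =>
    intro hw ht
    rw [dfsLoop, hget] at ht
    dsimp only at ht
    rw [if_neg hx0, dif_neg h1, dif_pos h2] at ht
    refine ih ?_ ht
    intro u hu
    have hv := hw v (List.mem_cons_self ..)
    rcases List.mem_cons.mp hu with rfl | hu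
    · exact .snoc v (v + x) x hv hget hx0 (.inr rfl) h2.1 h2.2.1 h2.2.2.1
    · exact hw u (List.mem_cons_of_mem _ hu)
  | case7 seen v rest x hget hx0 h1 h2 ih =>
    intro hw ht
    rw [dfsLoop, hget] at ht
    dsimp only at ht
    rw [if_neg hx0, dif_neg h1, dif_neg h2] at ht
    exact ih (fun u hu => hw u (List.mem_cons_of_mem _ hu)) ht

def pvInv (n : List Int) (nb : List Int) (stack seen : List Int) : Prop :=
  ∀ y ∈ seen, ∀ d, pvRD n nb d y → ∃ u ∈ stack, ∃ d' ≤ d, pvRD n nb d' u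

theorem pvGetSome (n : List Int) (w : Int) (hge : 0 ≤ w) (hlt : w < (n.length : Int)) :
    ∃ x, PySem.List.pyGet? n w = some x := by
  exact ⟨_, PySem.List.pyGet?_eq_some_getElem n hge hlt⟩

theorem pvRD_inv (n : List Int) (nb : List Int) (d : Nat) (v : Int) (h : pvRD n nb d v) :
    (∃ x, PySem.List.pyGet? n v = some x ∧ x = 0) ∨
    (∃ w x d'', d = d'' + 1 ∧ PySem.List.pyGet? n v = some x ∧ x ≠ 0 ∧
      (w = v - x ∨ w = v + x) ∧ 0 ≤ w ∧ w < (n.length : Int) ∧ w ∉ nb ∧ pvRD n nb d'' w) := by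
  cases h with
  | zero d v x hx h0 => exact .inl ⟨x, hx, h0⟩
  | step d v w x hx h0 hw hge hlt hnb hr => exact .inr ⟨w, x, d, rfl, hx, h0, hw, hge, hlt, hnb, hr⟩

theorem pvInv_step (n : List Int) (nb : List Int) (v : Int) (rest seen : List Int) (x : Int)
    (hx : PySem.List.pyGet? n v = some x) (h0 : x ≠ 0) (pushed : List Int)
    (hcover : ∀ w', (w' = v - x ∨ w' = v + x) → 0 ≤ w' → w' < (n.length : Int) →
      w' ∉ nb → w' ∈ pushed ∨ w' ∈ seen)
    (hinv : pvInv n nb (v :: rest) seen) :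
    pvInv n nb (pushed ++ rest) (pushed ++ seen) := by
  have H : ∀ d, ∀ y ∈ pushed ++ seen, pvRD n nb d y →
      ∃ u ∈ pushed ++ rest, ∃ d' ≤ d, pvRD n nb d' u := by
    intro d
    induction d using Nat.strong_induction_on with
    | _ d IH =>
      intro y hy hrd
      rcases List.mem_append.mp hy with hyp | hys
      · exact ⟨y, List.mem_append.mpr (.inl hyp), d, le_refl d, hrd⟩
      · obtain ⟨u, hu, d', hd', hrdu⟩ := hinv y hys d hrd
        rcases List.mem_cons.mp hu with rfl | hur
        · rcases pvRD_inv n nb d' u hrdu with ⟨x', hx', h0'⟩ |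
            ⟨w', x', d'', hd'', hx', h0', hw', hge', hlt', hnb', hr'⟩
          · have hxx : x = x' := by rw [hx] at hx'; exact Option.some.inj hx'
            exact absurd (hxx ▸ h0') h0
          · have hxx : x = x' := by rw [hx] at hx'; exact Option.some.inj hx'
            subst hxx
            rcases hcover w' hw' hge' hlt' hnb' with hwp | hws
            · exact ⟨w', List.mem_append.mpr (.inl hwp), d'', by omega, hr'⟩
            · obtain ⟨u2, hu2, e, he, hre⟩ :=
                IH d'' (by omega) w' (List.mem_append.mpr (.inr hws)) hr'
              exact ⟨u2, hu2, e, by omega, hre⟩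
        · exact ⟨u, List.mem_append.mpr (.inr hur), d', hd', hrdu⟩
  exact fun y hy d => H d y hy

theorem dfsLoop_complete (n : List Int) (nb : List Int) :
    ∀ (stack seen : List Int), pvInv n nb stack seen →
      (∀ u ∈ stack, ∃ x, PySem.List.pyGet? n u = some x) →
      dfsLoop n nb stack seen = false → ∀ y ∈ seen, ¬ pvR n nb y := by
  intro stack seen
  induction stack, seen using dfsLoop.induct n nb with
  | case1 seen =>
    intro hinv _ _ y hy hr
    obtain ⟨d, hd⟩ := (pvR_iff_exists n nb y).mp hr
    obtain ⟨u, hu, _⟩ := hinv y hy d hd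
    cases hu
  | case2 seen v rest hget =>
    intro _ hok _ _ _ _
    obtain ⟨x, hx⟩ := hok v (List.mem_cons_self ..)
    rw [hget] at hx
    cases hx
  | case3 seen v rest hget =>
    intro _ _ hfalse
    rw [dfsLoop, hget] at hfalse
    dsimp only at hfalse
    rw [if_pos rfl] at hfalse
    cases hfalse
  | case4 seen v rest x hget hx0 h1 h2 ih =>
    intro hinv hok hfalse y hy
    rw [dfsLoop, hget] at hfalse
    dsimp only at hfalse
    rw [if_neg hx0, dif_pos h1, dif_pos h2] at hfalse
    have hinv' : pvInv n nb ((v + x) :: (v - x) :: rest) ((v + x) :: (v - x) :: seen) := by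
      have hc : ∀ w', (w' = v - x ∨ w' = v + x) → 0 ≤ w' → w' < (n.length : Int) →
          w' ∉ nb → w' ∈ [v + x, v - x] ∨ w' ∈ seen := by
        intro w' hw' _ _ _
        rcases hw' with rfl | rfl
        · exact .inl (by simp)
        · exact .inl (by simp)
      exact pvInv_step n nb v rest seen x hget hx0 [v + x, v - x] hc hinv
    have hok' : ∀ u ∈ (v + x) :: (v - x) :: rest, ∃ x0, PySem.List.pyGet? n u = some x0 := by
      intro u hu
      rcases List.mem_cons.mp hu with rfl | hu
      · exact pvGetSome n _ h2.1 h2.2.1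
      · rcases List.mem_cons.mp hu with rfl | hu
        · exact pvGetSome n _ h1.1 h1.2.1
        · exact hok u (List.mem_cons_of_mem _ hu)
    exact ih hinv' hok' hfalse y (List.mem_cons_of_mem _ (List.mem_cons_of_mem _ hy))
  | case5 seen v rest x hget hx0 h1 h2 ih =>
    intro hinv hok hfalse y hy
    rw [dfsLoop, hget] at hfalse
    dsimp only at hfalse
    rw [if_neg hx0, dif_pos h1, dif_neg h2] at hfalse
    have hinv' : pvInv n nb ((v - x) :: rest) ((v - x) :: seen) := by
      have hc : ∀ w', (w' = v - x ∨ w' = v + x) → 0 ≤ w' → w' < (n.length : Int) →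
          w' ∉ nb → w' ∈ [v - x] ∨ w' ∈ seen := by
        intro w' hw' hge hlt hnb2
        rcases hw' with rfl | rfl
        · exact .inl (by simp)
        · have hmem : v + x ∈ (v - x) :: seen := by
            by_contra hno
            exact h2 ⟨hge, hlt, hnb2, hno⟩
          rcases List.mem_cons.mp hmem with he | hs
          · exact .inl (by simp [he])
          · exact .inr hs
      exact pvInv_step n nb v rest seen x hget hx0 [v - x] hc hinv
    have hok' : ∀ u ∈ (v - x) :: rest, ∃ x0, PySem.List.pyGet? n u = some x0 := by
      intro u hu
      rcases List.mem_cons.mp hu with rfl | hu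
      · exact pvGetSome n _ h1.1 h1.2.1
      · exact hok u (List.mem_cons_of_mem _ hu)
    exact ih hinv' hok' hfalse y (List.mem_cons_of_mem _ hy)
  | case6 seen v rest x hget hx0 h1 h2 ih =>
    intro hinv hok hfalse y hy
    rw [dfsLoop, hget] at hfalse
    dsimp only at hfalse
    rw [if_neg hx0, dif_neg h1, dif_pos h2] at hfalse
    have hinv' : pvInv n nb ((v + x) :: rest) ((v + x) :: seen) := by
      have hc : ∀ w', (w' = v - x ∨ w' = v + x) → 0 ≤ w' → w' < (n.length : Int) →
          w' ∉ nb → w' ∈ [v + x] ∨ w' ∈ seen := by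
        intro w' hw' hge hlt hnb2
        rcases hw' with rfl | rfl
        · have hmem : v - x ∈ seen := by
            by_contra hno
            exact h1 ⟨hge, hlt, hnb2, hno⟩
          exact .inr hmem
        · exact .inl (by simp)
      exact pvInv_step n nb v rest seen x hget hx0 [v + x] hc hinv
    have hok' : ∀ u ∈ (v + x) :: rest, ∃ x0, PySem.List.pyGet? n u = some x0 := by
      intro u hu
      rcases List.mem_cons.mp hu with rfl | hu
      · exact pvGetSome n _ h2.1 h2.2.1
      · exact hok u (List.mem_cons_of_mem _ hu)
    exact ih hinv' hok' hfalse y (List.mem_cons_of_mem _ hy)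
  | case7 seen v rest x hget hx0 h1 h2 ih =>
    intro hinv hok hfalse y hy
    rw [dfsLoop, hget] at hfalse
    dsimp only at hfalse
    rw [if_neg hx0, dif_neg h1, dif_neg h2] at hfalse
    have hinv' : pvInv n nb rest seen := by
      have hc : ∀ w', (w' = v - x ∨ w' = v + x) → 0 ≤ w' → w' < (n.length : Int) →
          w' ∉ nb → w' ∈ ([] : List Int) ∨ w' ∈ seen := by
        intro w' hw' hge hlt hnb2
        rcases hw' with rfl | rfl
        · have hmem : v - x ∈ seen := by
            by_contra hno
            exact h1 ⟨hge, hlt, hnb2, hno⟩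
          exact .inr hmem
        · have hmem : v + x ∈ seen := by
            by_contra hno
            exact h2 ⟨hge, hlt, hnb2, hno⟩
          exact .inr hmem
      have := pvInv_step n nb v rest seen x hget hx0 [] hc hinv
      simpa using this
    exact ih hinv' (fun u hu => hok u (List.mem_cons_of_mem _ hu)) hfalse y hy

theorem dfs_alt_true_iff (n : List Int) (s : Int) (nb : List Int) (x : Int)
    (hx : PySem.List.pyGet? n s = some x) :
    (dfs_alt n s nb = true ↔ pvR n nb s) := by
  rw [dfs_alt, hx]
  dsimp only
  by_cases hx0 : x = 0
  · subst hx0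
    rw [if_pos rfl]
    simp only [true_iff]
    exact .zero s 0 hx rfl
  · rw [if_neg hx0]
    constructor
    · intro ht
      refine dfsLoop_sound n nb s [s] [s] ?_ ht
      intro u hu
      rcases List.mem_cons.mp hu with rfl | hu
      · exact .refl
      · cases hu
    · intro hr
      by_contra hfalse
      have hf : dfsLoop n nb [s] [s] = false := by
        cases hb : dfsLoop n nb [s] [s]
        · rfl
        · exact absurd hb hfalse
      have hinv : pvInv n nb [s] [s] := by
        intro y hy d hd
        rcases List.mem_cons.mp hy with rfl | hy
        · exact ⟨y, List.mem_cons_self .., d, le_refl d, hd⟩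
        · cases hy
      have hok : ∀ u ∈ [s], ∃ x0, PySem.List.pyGet? n u = some x0 := by
        intro u hu
        rcases List.mem_cons.mp hu with rfl | hu
        · exact ⟨x, hx⟩
        · cases hu
      exact dfsLoop_complete n nb [s] [s] hinv hok hf s (List.mem_cons_self ..) hr

-- ===== VERDICT (by name: the statement is the Claim_ definition above) =====
theorem dfs_spec : Claim_equal_dfs := by
  intro n s nb _ hpre
  unfold Spec_dfs
  have hx : ∃ x, PySem.List.pyGet? n s = some x := by
    cases hg : PySem.List.pyGet? n s with
    | none =>
      exfalso
      have hni := (PySem.List.pyGet?_eq_none_iff n s).mp hg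
      unfold Pre_dfs at hpre
      simp [PySem.Raise.InRange] at hni
      omega
    | some x => exact ⟨x, rfl⟩
  obtain ⟨x, hx⟩ := hx
  have hA : dfs n s nb = true ↔ pvR n nb s := by
    rw [dfs_true_iff n (pvFresh n nb) nb s rfl]
    exact ⟨pvR_of_pvRA n nb s, pvRA_of_pvR n (pvFresh n nb) nb s rfl⟩
  have hB := dfs_alt_true_iff n s nb x hx
  cases hdA : dfs n s nb <;> cases hdB : dfs_alt n s nb
  · rfl
  · exact absurd (hA.mpr (hB.mp hdB)) (by simp [hdA])
  · exact absurd (hB.mpr (hA.mp hdA)) (by simp [hdB])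
  · rfl
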